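-- pv_equiv track=rewrite | github.com/ANMillerIII/Practice-Problems | word.py | use_digit
-- ===== SOURCE A (Python) =====
-- def use_digit(letter_dict, word_dict, digit):
--     for char in word_dict:
--         if char not in letter_dict or word_dict[char] > letter_dict[char]:
--             return letter_dict, 0
--
--     for char in word_dict:
--         letter_dict[char] -= word_dict[char]
--
--     letter_dict, uses = use_digit(letter_dict, word_dict, digit)
--     return letter_dict, uses + 1
-- ===== SOURCE B (Python) =====
-- def use_digit(letter_dict, word_dict, digit):
--     # Closed-form uses, then a single subtraction pass.
--     # Mutates letter_dict in place, like the original.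
--     if any(c not in letter_dict or word_dict[c] > letter_dict[c] for c in word_dict):
--         return letter_dict, 0
--     uses = min(letter_dict[c] // word_dict[c] for c in word_dict if word_dict[c] > 0)
--     for c in word_dict:
--         letter_dict[c] -= uses * word_dict[c]
--     return letter_dict, uses
-- ===== Notes on version B (the rewrite author's own statement) =====
-- stated objective: alternative
-- what changed: B computes uses = min(letter[c]//word[c] over positive word counts) in closed form and subtracts uses*word[c] in one pass, instead of A's recursion that re-checks and re-subtracts once per use.
import Mathlib
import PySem

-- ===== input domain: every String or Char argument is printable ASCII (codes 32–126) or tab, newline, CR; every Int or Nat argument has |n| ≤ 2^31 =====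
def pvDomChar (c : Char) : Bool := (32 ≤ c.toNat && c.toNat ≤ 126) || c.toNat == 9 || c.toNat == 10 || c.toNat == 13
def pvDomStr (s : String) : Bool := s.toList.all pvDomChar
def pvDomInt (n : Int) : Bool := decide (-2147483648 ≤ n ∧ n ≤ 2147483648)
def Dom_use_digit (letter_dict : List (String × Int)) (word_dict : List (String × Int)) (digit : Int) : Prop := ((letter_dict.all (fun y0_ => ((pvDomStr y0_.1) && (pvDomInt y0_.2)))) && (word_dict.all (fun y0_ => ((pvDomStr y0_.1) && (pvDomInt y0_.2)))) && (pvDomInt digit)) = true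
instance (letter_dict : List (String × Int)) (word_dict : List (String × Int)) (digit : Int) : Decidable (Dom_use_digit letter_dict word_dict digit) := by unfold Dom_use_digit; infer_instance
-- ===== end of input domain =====

-- B replaces A's one-recursive-call-per-use scheme by a closed-form uses = min(letter[c]//word[c])
-- computed in one pass (objective: alternative).  Both Pythons mutate letter_dict in place; the
-- equivalence proved here is about the RETURN value (both return the mutated dict).

-- ===== PORT A =====
-- A's first loop: 'for char in word_dict: if char not in letter_dict or word_dict[char] > letter_dict[char]: return letter_dict, 0'
def useDigitCheckA (L W : PySem.Dict String Int) : List String → Bool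
  | [] => true
  | c :: rest =>
    if !(L.contains c) || decide (W.getD c 0 > L.getD c 0) then false
    else useDigitCheckA L W rest

-- A's recursion, made total with a fuel counter (fuel only makes the same computation total;
-- on inputs where the Python recurses forever the fuel runs out, and Pre_ excludes exactly those).
def useDigitGoA (W : PySem.Dict String Int) : Nat → PySem.Dict String Int → PySem.Dict String Int × Int
  | 0, L => (L, 0)
  | fuel+1, L =>
    if useDigitCheckA L W W.keys then
      -- 'for char in word_dict: letter_dict[char] -= word_dict[char]'
      let L' := W.keys.foldl (fun d c => d.insert c (d.getD c 0 - W.getD c 0)) L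
      let r := useDigitGoA W fuel L'
      (r.1, r.2 + 1)
    else (L, 0)

def use_digit (letter_dict : List (String × Int)) (word_dict : List (String × Int)) (digit : Int) : (List (String × Int)) × Int :=
  let L := PySem.Dict.ofList letter_dict
  let W := PySem.Dict.ofList word_dict
  -- fuel: one more than the sum of |letter counts|; inside Pre_ this exceeds the recursion depth
  let r := useDigitGoA W (L.values.foldl (fun s v => s + v.natAbs) 0 + 1) L
  (r.1.items, r.2)

-- ===== PORT B =====
def use_digit_alt (letter_dict : List (String × Int)) (word_dict : List (String × Int)) (digit : Int) : (List (String × Int)) × Int :=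
  let L := PySem.Dict.ofList letter_dict
  let W := PySem.Dict.ofList word_dict
  if W.keys.any (fun c => !(L.contains c) || decide (W.getD c 0 > L.getD c 0)) then
    (L.items, 0)
  else
    match PySem.List.min? ((W.keys.filter (fun c => decide (W.getD c 0 > 0))).map
        (fun c => PySem.Int.floordiv (L.getD c 0) (W.getD c 0))) (fun x => x) with
    | none => (L.items, 0)   -- Python's min raises ValueError here (excluded by Pre_)
    | some uses =>
      let L' := W.keys.foldl (fun d c => d.insert c (d.getD c 0 - uses * W.getD c 0)) L
      (L'.items, uses)

-- ===== PRECONDITION & SPEC =====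
-- Pre_ excludes exactly the inputs on which A recurses forever (RecursionError): every word key
-- present with word count ≤ letter count, and no word count positive (B's min then raises ValueError).
def Pre_use_digit (letter_dict : List (String × Int)) (word_dict : List (String × Int)) (digit : Int) : Prop :=
  ¬ ((∀ c ∈ (PySem.Dict.ofList word_dict).keys,
        (PySem.Dict.ofList letter_dict).contains c = true ∧
        (PySem.Dict.ofList word_dict).getD c 0 ≤ (PySem.Dict.ofList letter_dict).getD c 0) ∧
     (∀ c ∈ (PySem.Dict.ofList word_dict).keys, (PySem.Dict.ofList word_dict).getD c 0 ≤ 0))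
instance (letter_dict : List (String × Int)) (word_dict : List (String × Int)) (digit : Int) : Decidable (Pre_use_digit letter_dict word_dict digit) := by unfold Pre_use_digit; infer_instance

def pvWitness_use_digit : (List (String × Int)) × (List (String × Int)) × Int := ([("a", 3)], [("a", 2)], 0)

def Spec_use_digit (letter_dict : List (String × Int)) (word_dict : List (String × Int)) (digit : Int) (out : (List (String × Int)) × Int) : Prop := out = use_digit_alt letter_dict word_dict digit
instance (letter_dict : List (String × Int)) (word_dict : List (String × Int)) (digit : Int) (out : (List (String × Int)) × Int) : Decidable (Spec_use_digit letter_dict word_dict digit out) := by unfold Spec_use_digit; infer_instance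

-- ===== CLAIM (what is proved, stated in full; the proofs are below) =====
def Claim_equal_use_digit : Prop := ∀ (letter_dict : List (String × Int)) (word_dict : List (String × Int)) (digit : Int), Dom_use_digit letter_dict word_dict digit → Pre_use_digit letter_dict word_dict digit → Spec_use_digit letter_dict word_dict digit (use_digit letter_dict word_dict digit)


-- ===== LEMMAS AND PROOFS =====

-- one step of the check loop of A equals the Bool 'any' of B's check
lemma checkA_eq_not_any (L W : PySem.Dict String Int) (ks : List String) :
    useDigitCheckA L W ks = !(ks.any (fun c => !(L.contains c) || decide (W.getD c 0 > L.getD c 0))) := by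
  induction ks with
  | nil => rfl
  | cons c rest ih =>
    simp only [useDigitCheckA, List.any_cons]
    by_cases h : (!(L.contains c) || decide (W.getD c 0 > L.getD c 0)) = true
    · simp [h]
    · simp only [Bool.not_eq_true] at h
      simp [h, ih]

-- lookups after the subtraction loop (any g), over distinct keys
lemma fold_getD (g : String → Int) (x : String) :
    ∀ (ks : List String) (d : PySem.Dict String Int), ks.Nodup →
      (ks.foldl (fun d c => d.insert c (d.getD c 0 - g c)) d).getD x 0 =
        if x ∈ ks then d.getD x 0 - g x else d.getD x 0 := by
  intro ks
  induction ks with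
  | nil => intro d _; simp
  | cons c rest ih =>
    intro d hnd
    simp only [List.foldl_cons]
    rw [ih _ hnd.of_cons]
    by_cases hx : x ∈ rest
    · have hxc : x ≠ c := by rintro rfl; exact (List.nodup_cons.mp hnd).1 hx
      rw [PySem.Dict.getD_insert]
      simp [hx, hxc]
    · by_cases hxc : x = c
      · subst hxc
        simp [hx, PySem.Dict.getD_insert]
      · simp [hx, hxc, PySem.Dict.getD_insert]

-- membership is preserved by the subtraction loop when all touched keys are present
lemma fold_contains (g : String → Int) (x : String) :
    ∀ (ks : List String) (d : PySem.Dict String Int), (∀ c ∈ ks, d.contains c = true) →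
      (ks.foldl (fun d c => d.insert c (d.getD c 0 - g c)) d).contains x = d.contains x := by
  intro ks
  induction ks with
  | nil => intro d _; rfl
  | cons c rest ih =>
    intro d hc
    simp only [List.foldl_cons]
    rw [ih]
    · rw [PySem.Dict.contains_insert]
      by_cases hxc : x = c
      · subst hxc; simp [hc x (by simp)]
      · simp [hxc]
    · intro c' hc'
      rw [PySem.Dict.contains_insert]
      simp [hc c' (List.mem_cons_of_mem _ hc')]

lemma fold_nodup_keys (g : String → Int) :
    ∀ (ks : List String) (d : PySem.Dict String Int), d.keys.Nodup →
      (ks.foldl (fun d c => d.insert c (d.getD c 0 - g c)) d).keys.Nodup := by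
  intro ks
  induction ks with
  | nil => intro d h; exact h
  | cons c rest ih =>
    intro d h
    exact ih _ (PySem.Dict.nodup_keys_insert _ _ _ h)

-- the items list after the subtraction loop: every present key's value drops by g
lemma fold_items (g : String → Int) :
    ∀ (ks : List String) (d : PySem.Dict String Int), ks.Nodup → d.keys.Nodup →
      (∀ c ∈ ks, d.contains c = true) →
      (ks.foldl (fun d c => d.insert c (d.getD c 0 - g c)) d).items =
        d.items.map (fun p => if p.1 ∈ ks then (p.1, p.2 - g p.1) else p) := by
  intro ks
  induction ks with
  | nil => intro d _ _ _; simp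
  | cons c rest ih =>
    intro d hks hnd hc
    simp only [List.foldl_cons]
    rw [ih _ hks.of_cons]
    · rw [PySem.Dict.items_insert_of_contains _ _ (hc c (by simp)), List.map_map]
      apply List.map_congr_left
      intro p hp
      by_cases hpc : p.1 = c
      · have hval : d.getD c 0 = p.2 := by
          have : (c, p.2) ∈ d.items := by rw [← hpc]; exact hp
          exact PySem.Dict.getD_of_mem_items d this hnd 0
        have hcr : c ∉ rest := (List.nodup_cons.mp hks).1
        simp only [Function.comp, hpc, BEq.rfl, if_pos, beq_self_eq_true]
        simp [hcr, hpc, hval]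
      · have : (p.1 == c) = false := by simp [hpc]
        simp only [Function.comp, this, Bool.false_eq_true, if_false]
        by_cases hpr : p.1 ∈ rest
        · simp [hpr, hpc]
        · simp [hpr, hpc]
    · exact PySem.Dict.nodup_keys_insert _ _ _ hnd
    · intro c' hc'
      rw [PySem.Dict.contains_insert]
      simp [hc c' (List.mem_cons_of_mem _ hc')]

-- abbreviations used by the main induction (proof-local)
def pvOk (L W : PySem.Dict String Int) : Prop :=
  ∀ c ∈ W.keys, L.contains c = true ∧ W.getD c 0 ≤ L.getD c 0

def pvQs (L W : PySem.Dict String Int) : List Int :=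
  (W.keys.filter (fun c => decide (W.getD c 0 > 0))).map
    (fun c => PySem.Int.floordiv (L.getD c 0) (W.getD c 0))

def pvSub (L W : PySem.Dict String Int) (n : Int) : PySem.Dict String Int :=
  W.keys.foldl (fun d c => d.insert c (d.getD c 0 - n * W.getD c 0)) L

lemma pvOk_iff_any_false (L W : PySem.Dict String Int) :
    (W.keys.any (fun c => !(L.contains c) || decide (W.getD c 0 > L.getD c 0))) = false ↔ pvOk L W := by
  unfold pvOk
  rw [List.any_eq_false]
  apply forall_congr'
  intro c
  apply imp_congr_right
  intro _
  cases h : L.contains c <;> simp [h]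

-- each candidate quotient is at least 1 when the check passes
lemma pvQs_ge_one (L W : PySem.Dict String Int) (hok : pvOk L W) :
    ∀ q ∈ pvQs L W, 1 ≤ q := by
  intro q hq
  simp only [pvQs, List.mem_map, List.mem_filter] at hq
  obtain ⟨c, ⟨hck, hcpos⟩, rfl⟩ := hq
  have hpos : 0 < W.getD c 0 := by simpa using hcpos
  have hle := (hok c hck).2
  rw [PySem.Int.le_floordiv_iff_mul_le hpos]
  omega

-- smaller helpers for the fuel bound
lemma foldl_natAbs_ge_init : ∀ (l : List Int) (n : Nat), n ≤ l.foldl (fun s x => s + x.natAbs) n := by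
  intro l
  induction l with
  | nil => intro n; simp
  | cons x t ih =>
    intro n
    simp only [List.foldl_cons]
    exact le_trans (Nat.le_add_right n x.natAbs) (ih _)

lemma natAbs_le_foldl {v : Int} : ∀ (l : List Int), v ∈ l → ∀ (n : Nat), v.natAbs ≤ l.foldl (fun s x => s + x.natAbs) n := by
  intro l
  induction l with
  | nil => intro h; cases h
  | cons x t ih =>
    intro h n
    simp only [List.foldl_cons]
    rcases List.mem_cons.mp h with rfl | hm
    · exact le_trans (Nat.le_add_left v.natAbs n) (foldl_natAbs_ge_init t _)
    · exact ih hm _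

-- quotients shift by one after one subtraction pass
lemma pvQs_step (L W : PySem.Dict String Int) (hW : W.keys.Nodup) :
    pvQs (W.keys.foldl (fun d c => d.insert c (d.getD c 0 - W.getD c 0)) L) W =
      (pvQs L W).map (fun q => q - 1) := by
  unfold pvQs
  rw [List.map_map]
  apply List.map_congr_left
  intro c hc
  rw [List.mem_filter] at hc
  obtain ⟨hck, hcpos⟩ := hc
  have hpos : 0 < W.getD c 0 := by simpa using hcpos
  rw [fold_getD _ _ _ _ hW]
  simp only [hck, if_pos, Function.comp]
  rw [PySem.Int.floordiv_eq_ediv_of_pos hpos, PySem.Int.floordiv_eq_ediv_of_pos hpos]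
  have h := Int.add_mul_ediv_right (L.getD c 0) (-1) (ne_of_gt hpos)
  have e : L.getD c 0 - W.getD c 0 = L.getD c 0 + -1 * W.getD c 0 := by ring
  rw [e, h]
  ring

-- main lemma: with enough fuel, A's recursion computes B's closed form
lemma goA_eq (W : PySem.Dict String Int) (hW : W.keys.Nodup) :
    ∀ (fuel : Nat) (L : PySem.Dict String Int) (u : Int), L.keys.Nodup → pvOk L W →
      PySem.List.min? (pvQs L W) (fun x => x) = some u → u.toNat + 1 ≤ fuel →
      useDigitGoA W fuel L = (pvSub L W u, u) := by
  intro fuel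
  induction fuel with
  | zero => intro L u _ _ _ hf; omega
  | succ n ih =>
    intro L u hLnd hok hmin hf
    have hu1 : 1 ≤ u := pvQs_ge_one L W hok u (PySem.List.min?_mem hmin)
    have hany : (W.keys.any (fun c => !(L.contains c) || decide (W.getD c 0 > L.getD c 0))) = false :=
      (pvOk_iff_any_false L W).mpr hok
    have hcont : ∀ c ∈ W.keys, L.contains c = true := fun c hc => (hok c hc).1
    -- one unfolding of A's recursion: the check passes
    simp only [useDigitGoA, checkA_eq_not_any, hany, Bool.not_false, if_pos]
    set L1 := W.keys.foldl (fun d c => d.insert c (d.getD c 0 - W.getD c 0)) L with hL1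
    have hL1nd : L1.keys.Nodup := fold_nodup_keys _ _ _ hLnd
    have hL1cont : ∀ x, L1.contains x = L.contains x := fun x => fold_contains _ x _ _ hcont
    have hL1getD : ∀ x ∈ W.keys, L1.getD x 0 = L.getD x 0 - W.getD x 0 := by
      intro x hx
      rw [hL1, fold_getD _ _ _ _ hW]
      simp [hx]
    -- the minimum drops by exactly one
    have hqs1 : pvQs L1 W = (pvQs L W).map (fun q => q - 1) := pvQs_step L W hW
    have hqs_ne : pvQs L W ≠ [] := by
      intro h
      rw [h, (PySem.List.min?_eq_none_iff ([] : List Int) (fun x => x)).mpr rfl] at hmin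
      cases hmin
    have hmin1 : PySem.List.min? (pvQs L1 W) (fun x => x) = some (u - 1) := by
      rcases h1 : PySem.List.min? (pvQs L1 W) (fun x => x) with _ | u'
      · rw [PySem.List.min?_eq_none_iff, hqs1] at h1
        exact absurd (List.map_eq_nil_iff.mp h1) hqs_ne
      · have hm' : u' ∈ pvQs L1 W := PySem.List.min?_mem h1
        rw [hqs1, List.mem_map] at hm'
        obtain ⟨q, hq, rfl⟩ := hm'
        have h1le : u ≤ q := PySem.List.min?_isMin hmin q hq
        have h2le : q - 1 ≤ u - 1 := by
          have : u - 1 ∈ pvQs L1 W := by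
            rw [hqs1, List.mem_map]
            exact ⟨u, PySem.List.min?_mem hmin, rfl⟩
          exact PySem.List.min?_isMin h1 _ this
        have : q - 1 = u - 1 := le_antisymm h2le (by omega)
        exact congrArg some this
    by_cases hu2 : 2 ≤ u
    · -- the check still passes after one subtraction: recurse via the IH
      have hok1 : pvOk L1 W := by
        intro c hc
        refine ⟨by rw [hL1cont]; exact hcont c hc, ?_⟩
        rw [hL1getD c hc]
        by_cases hcp : 0 < W.getD c 0
        · have hcmem : c ∈ W.keys.filter (fun c => decide (W.getD c 0 > 0)) :=
            List.mem_filter.mpr ⟨hc, by simpa using hcp⟩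
          have hqmem : PySem.Int.floordiv (L.getD c 0) (W.getD c 0) ∈ pvQs L W := by
            unfold pvQs
            exact List.mem_map.mpr ⟨c, hcmem, rfl⟩
          have hle := PySem.List.min?_isMin hmin _ hqmem
          have : 2 ≤ PySem.Int.floordiv (L.getD c 0) (W.getD c 0) := le_trans hu2 hle
          rw [PySem.Int.le_floordiv_iff_mul_le hcp] at this
          omega
        · have := (hok c hc).2
          omega
      have hrec := ih L1 (u - 1) hL1nd hok1 hmin1 (by omega)
      rw [hrec]
      refine Prod.ext ?_ (by simp)
      show pvSub L1 W (u - 1) = pvSub L W u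
      apply PySem.Dict.ext
      unfold pvSub
      rw [fold_items _ _ _ hW hL1nd (by intro c hc; rw [hL1cont]; exact hcont c hc),
          hL1, fold_items _ _ _ hW hLnd hcont, fold_items _ _ _ hW hLnd hcont, List.map_map]
      apply List.map_congr_left
      intro p _
      by_cases hp : p.1 ∈ W.keys
      · simp only [Function.comp, hp, if_pos]
        have : p.2 - W.getD p.1 0 - (u - 1) * W.getD p.1 0 = p.2 - u * W.getD p.1 0 := by ring
        simp [this]
      · simp [Function.comp, hp]
    · -- u = 1: the next check fails, the recursion stops after this pass
      have hu : u = 1 := by omega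
      subst hu
      obtain ⟨m, rfl⟩ : ∃ m, n = m + 1 := ⟨n - 1, by omega⟩
      have hz : (0 : Int) ∈ pvQs L1 W := by
        have := PySem.List.min?_mem hmin1
        simpa using this
      have hnotok : ¬ pvOk L1 W := by
        unfold pvQs at hz
        rw [List.mem_map] at hz
        obtain ⟨c, hc, hcz⟩ := hz
        rw [List.mem_filter] at hc
        obtain ⟨hck, hcpos⟩ := hc
        have hpos : 0 < W.getD c 0 := by simpa using hcpos
        intro hok1
        have := (hok1 c hck).2
        have h1 : PySem.Int.floordiv (L1.getD c 0) (W.getD c 0) < 1 → L1.getD c 0 < 1 * W.getD c 0 :=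
          (PySem.Int.floordiv_lt_iff_lt_mul hpos).mp
        omega
      have hany1 : (W.keys.any (fun c => !(L1.contains c) || decide (W.getD c 0 > L1.getD c 0))) = true := by
        by_contra h
        exact hnotok ((pvOk_iff_any_false L1 W).mp (Bool.eq_false_iff.mpr h))
      simp only [useDigitGoA, checkA_eq_not_any, hany1, Bool.not_true, Bool.false_eq_true, if_false]
      refine Prod.ext ?_ (by simp)
      show L1 = pvSub L W 1
      rw [hL1]
      unfold pvSub
      simp only [one_mul]

-- ===== VERDICT (by name: the statement is the Claim_ definition above) =====
theorem use_digit_spec : Claim_equal_use_digit := by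
  intro letter word digit _ hPre
  unfold Spec_use_digit
  simp only [use_digit, use_digit_alt]
  have hLnd : (PySem.Dict.ofList letter).keys.Nodup := PySem.Dict.nodup_keys_ofList _
  have hWnd : (PySem.Dict.ofList word).keys.Nodup := PySem.Dict.nodup_keys_ofList _
  set L := PySem.Dict.ofList letter with hL
  set W := PySem.Dict.ofList word with hWdef
  by_cases hany : (W.keys.any (fun c => !(L.contains c) || decide (W.getD c 0 > L.getD c 0))) = true
  · -- the very first check fails: both return (letter_dict, 0)
    rw [if_pos hany]
    simp only [useDigitGoA, checkA_eq_not_any, hany, Bool.not_true, Bool.false_eq_true, if_false]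
  · have hany' : (W.keys.any (fun c => !(L.contains c) || decide (W.getD c 0 > L.getD c 0))) = false :=
      Bool.eq_false_iff.mpr hany
    have hok : pvOk L W := (pvOk_iff_any_false L W).mp hany'
    -- Pre_ gives a word key with a positive count
    have hex : ∃ c ∈ W.keys, 0 < W.getD c 0 := by
      unfold Pre_use_digit at hPre
      rw [← hL, ← hWdef] at hPre
      push_neg at hPre
      obtain ⟨c, hc, hcpos⟩ := hPre (fun c hc => hok c hc)
      exact ⟨c, hc, by omega⟩
    obtain ⟨c0, hc0k, hc0pos⟩ := hex
    have hq0 : PySem.Int.floordiv (L.getD c0 0) (W.getD c0 0) ∈ pvQs L W := by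
      unfold pvQs
      exact List.mem_map.mpr ⟨c0, List.mem_filter.mpr ⟨hc0k, by simpa using hc0pos⟩, rfl⟩
    obtain ⟨u, hmin⟩ : ∃ u, PySem.List.min? (pvQs L W) (fun x => x) = some u := by
      rcases h : PySem.List.min? (pvQs L W) (fun x => x) with _ | u
      · rw [PySem.List.min?_eq_none_iff] at h
        rw [h] at hq0
        cases hq0
      · exact ⟨u, rfl⟩
    -- the fuel exceeds the number of uses
    have hfuel : u.toNat + 1 ≤ L.values.foldl (fun s v => s + v.natAbs) 0 + 1 := by
      have huq0 := PySem.List.min?_isMin hmin _ hq0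
      have hWge : 1 ≤ W.getD c0 0 := hc0pos
      have hLge : W.getD c0 0 ≤ L.getD c0 0 := (hok c0 hc0k).2
      have hq0le : PySem.Int.floordiv (L.getD c0 0) (W.getD c0 0) ≤ L.getD c0 0 := by
        rw [PySem.Int.floordiv_eq_ediv_of_pos hc0pos]
        exact Int.ediv_le_self _ (by omega)
      have hmem : L.getD c0 0 ∈ L.values := by
        have hcont := (hok c0 hc0k).1
        rw [PySem.Dict.contains_eq_isSome_get?] at hcont
        obtain ⟨v, hv⟩ := Option.isSome_iff_exists.mp hcont
        rw [PySem.Dict.getD_of_get?_eq_some _ _ hv]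
        have := PySem.Dict.mem_items_of_get?_eq_some _ hv
        exact List.mem_map.mpr ⟨(c0, v), this, rfl⟩
      have habs := natAbs_le_foldl _ hmem 0
      omega
    rw [goA_eq W hWnd _ L u hLnd hok hmin hfuel]
    rw [if_neg hany]
    have hminB : PySem.List.min? ((W.keys.filter (fun c => decide (W.getD c 0 > 0))).map
        (fun c => PySem.Int.floordiv (L.getD c 0) (W.getD c 0))) (fun x => x) = some u := hmin
    rw [hminB]
    rfl
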